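-- pv_equiv track=rewrite | github.com/factsbroicl/3dip-project | iteration 3.py | index_calculate
-- ===== SOURCE A (Python) =====
-- def index_calculate(inputf,list,ind): #Calculates index of item in list
--     """Gets the index based on selected item in 2d lists"""
--     for i, j  in enumerate(list):
--         if inputf == j[ind]:
--             index=i
--     try:
--         return index
--     except:
--         pass
-- ===== SOURCE B (Python) =====
-- def index_calculate(inputf, list, ind):
--     """Gets the index based on selected item in 2d lists"""
--     for i in range(len(list) - 1, -1, -1):
--         if inputf == list[i][ind]:
--             return i
--     return None
-- ===== Notes on version B (the rewrite author's own statement) =====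
-- stated objective: simpler
-- what changed: Replaced the full forward scan that keeps overwriting a running 'last matching index' with a reverse scan that returns immediately at the first match from the end; the dangling try/except around an possibly-unbound variable becomes an explicit 'return None'.
import Mathlib
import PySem

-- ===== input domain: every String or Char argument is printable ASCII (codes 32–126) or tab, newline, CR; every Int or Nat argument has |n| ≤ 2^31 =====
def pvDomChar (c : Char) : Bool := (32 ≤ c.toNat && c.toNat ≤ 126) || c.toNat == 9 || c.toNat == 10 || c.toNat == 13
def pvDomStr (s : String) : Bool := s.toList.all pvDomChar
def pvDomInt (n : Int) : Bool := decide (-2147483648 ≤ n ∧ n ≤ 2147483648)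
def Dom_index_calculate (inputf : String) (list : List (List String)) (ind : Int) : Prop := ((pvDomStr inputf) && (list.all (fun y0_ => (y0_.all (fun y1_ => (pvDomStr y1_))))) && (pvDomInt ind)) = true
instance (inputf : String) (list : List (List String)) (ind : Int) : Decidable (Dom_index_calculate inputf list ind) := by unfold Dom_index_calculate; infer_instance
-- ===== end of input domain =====

-- B replaces A's forward scan that overwrites a running 'last index' by a reverse scan with an
-- early return at the first match from the end (objective: simpler).

-- ===== PORT A =====
-- forward scan: fold over enumerate(list), overwriting the accumulator at every match.
-- j[ind] is ported with pyGet?; its none case (Python IndexError) is excluded by Pre_,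
-- where the port keeps the accumulator unchanged.
def index_calculate (inputf : String) (list : List (List String)) (ind : Int) : Option Int :=
  (PySem.List.enumerate list).foldl
    (fun acc p =>
      match PySem.List.pyGet? p.2 ind with
      | some v => if inputf = v then some p.1 else acc
      | none => acc)
    none

-- ===== PORT B =====
-- reverse scan with early return: first match of the reversed enumeration.
def indexCalcAltGo (inputf : String) (ind : Int) : List (Int × List String) → Option Int
  | [] => none
  | p :: rest =>
    match PySem.List.pyGet? p.2 ind with
    | some v => if inputf = v then some p.1 else indexCalcAltGo inputf ind rest
    | none => indexCalcAltGo inputf ind rest  -- Python IndexError; excluded by Pre_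

def index_calculate_alt (inputf : String) (list : List (List String)) (ind : Int) : Option Int :=
  indexCalcAltGo inputf ind (PySem.List.enumerate list).reverse

-- ===== PRECONDITION & SPEC =====
-- Pre_ excludes exactly the inputs where A raises IndexError: some row of the 2d list
-- has no element at index ind (Python negative indexing included); A evaluates j[ind]
-- on every row, so it raises whenever any row is out of range.
def Pre_index_calculate (inputf : String) (list : List (List String)) (ind : Int) : Prop :=
  ∀ row ∈ list, PySem.Raise.InRange row.length ind
instance (inputf : String) (list : List (List String)) (ind : Int) : Decidable (Pre_index_calculate inputf list ind) := by unfold Pre_index_calculate; infer_instance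

def pvWitness_index_calculate : String × List (List String) × Int :=
  ("b", [["a", "b"], ["b", "c"], ["a", "b"]], 1)

def Spec_index_calculate (inputf : String) (list : List (List String)) (ind : Int) (out : Option Int) : Prop := out = index_calculate_alt inputf list ind
instance (inputf : String) (list : List (List String)) (ind : Int) (out : Option Int) : Decidable (Spec_index_calculate inputf list ind out) := by unfold Spec_index_calculate; infer_instance

-- ===== CLAIM (what is proved, stated in full; the proofs are below) =====
def Claim_equal_index_calculate : Prop := ∀ (inputf : String) (list : List (List String)) (ind : Int), Dom_index_calculate inputf list ind → Pre_index_calculate inputf list ind → Spec_index_calculate inputf list ind (index_calculate inputf list ind)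

-- ===== LEMMAS AND PROOFS =====

-- one step of A's fold
def indexCalcStep (inputf : String) (ind : Int) (acc : Option Int) (p : Int × List String) : Option Int :=
  match PySem.List.pyGet? p.2 ind with
  | some v => if inputf = v then some p.1 else acc
  | none => acc

-- A's fold over l equals B's first-match-from-the-right over l.reverse, with the
-- accumulator as fallback.  Proved by induction on l from the right.
theorem indexCalc_fold_eq_go (inputf : String) (ind : Int) :
    ∀ (l : List (Int × List String)) (acc : Option Int),
      l.foldl (indexCalcStep inputf ind) acc =
        match indexCalcAltGo inputf ind l.reverse with
        | some i => some i
        | none => acc := by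
  intro l
  induction l using List.reverseRecOn with
  | nil => intro acc; simp [indexCalcAltGo]
  | append_singleton l p ih =>
    intro acc
    rw [List.foldl_append]
    simp only [List.foldl_cons, List.foldl_nil, List.reverse_append, List.reverse_singleton,
      List.singleton_append]
    show indexCalcStep inputf ind (l.foldl (indexCalcStep inputf ind) acc) p = _
    rw [indexCalcAltGo]
    show (match PySem.List.pyGet? p.2 ind with
          | some v => if inputf = v then some p.1 else l.foldl (indexCalcStep inputf ind) acc
          | none => l.foldl (indexCalcStep inputf ind) acc) = _
    cases h : PySem.List.pyGet? p.2 ind with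
    | some v =>
      by_cases hv : inputf = v
      · simp [hv]
      · simp only [hv, if_false]
        exact ih acc
    | none => exact ih acc

-- ===== VERDICT (by name: the statement is the Claim_ definition above) =====
theorem index_calculate_spec : Claim_equal_index_calculate := by
  intro inputf list ind _ _
  unfold Spec_index_calculate index_calculate index_calculate_alt
  have h := indexCalc_fold_eq_go inputf ind (PySem.List.enumerate list) none
  have hstep : (PySem.List.enumerate list).foldl (indexCalcStep inputf ind) none =
      (PySem.List.enumerate list).foldl
        (fun acc p =>
          match PySem.List.pyGet? p.2 ind with
          | some v => if inputf = v then some p.1 else acc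
          | none => acc) none := rfl
  rw [← hstep, h]
  cases indexCalcAltGo inputf ind (PySem.List.enumerate list).reverse <;> rfl
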